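-- pv_equiv track=rewrite | github.com/uzzielperez/lhcbAIxprt | ace_framework.py | compress_context_for_api
-- ===== SOURCE A (Python) =====
-- def compress_context_for_api(context: str, max_tokens: int = 5000) -> str:
--     """
--     Compress context to fit within API token limits
--     This prevents the 413 Payload Too Large error
--     """
--     # Estimate tokens (rough approximation: 1 token  4 characters)
--     estimated_tokens = len(context) // 4
--
--     if estimated_tokens <= max_tokens:
--         return context
--
--     # If context is too large, compress it intelligently
--     compression_ratio = max_tokens / estimated_tokens
--
--     # Split context into sentences
--     sentences = context.split('. ')
--
--     # Prioritize sentences with key information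
--     prioritized_sentences = []
--     for sentence in sentences:
--         # Higher priority for sentences with key terms
--         priority = 0
--         key_terms = ['4-cells', 'noisy', 'vertical', 'ECAL', 'HCAL', 'restart', 'ProblemDB', 'board']
--         for term in key_terms:
--             if term.lower() in sentence.lower():
--                 priority += 1
--
--         prioritized_sentences.append((priority, sentence))
--
--     # Sort by priority and take top sentences
--     prioritized_sentences.sort(key=lambda x: x[0], reverse=True)
--
--     # Take sentences until we're under the token limit
--     compressed_sentences = []
--     current_tokens = 0
--
--     for priority, sentence in prioritized_sentences:
--         sentence_tokens = len(sentence) // 4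
--         if current_tokens + sentence_tokens <= max_tokens:
--             compressed_sentences.append(sentence)
--             current_tokens += sentence_tokens
--         else:
--             break
--
--     # Join and add compression notice
--     compressed_context = '. '.join(compressed_sentences)
--     if len(compressed_sentences) < len(sentences):
--         compressed_context += f"\n\n[Context compressed from {len(sentences)} to {len(compressed_sentences)} sentences to fit API limits]"
--
--     return compressed_context
-- ===== SOURCE B (Python) =====
-- def compress_context_for_api(context: str, max_tokens: int = 5000) -> str:
--     """Bucket-by-priority re-implementation: no sort. One pass drops each sentence
--     into the bucket of its key-term count; buckets are then stacked highest-first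
--     (original order within a bucket = the stable sort order), the number of kept
--     sentences is counted against the token budget, and the answer is a take+join."""
--     if max_tokens < len(context) // 4:
--         sentences = context.split('. ')
--         key_terms = ['4-cells', 'noisy', 'vertical', 'ECAL', 'HCAL', 'restart', 'ProblemDB', 'board']
--         buckets = [[] for _ in range(len(key_terms) + 1)]
--         for s in sentences:
--             low = s.lower()
--             buckets[sum(t.lower() in low for t in key_terms)].append(s)
--         ordered = []
--         for bucket in buckets:
--             ordered = bucket + ordered
--         k, total = 0, 0
--         for s in ordered:
--             t = len(s) // 4
--             if max_tokens < total + t: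
--                 break
--             total += t
--             k += 1
--         notice = ("" if k >= len(sentences) else
--                   f"\n\n[Context compressed from {len(sentences)} to {k} sentences to fit API limits]")
--         return '. '.join(ordered[:k]) + notice
--     return context
-- ===== Notes on version B (the rewrite author's own statement) =====
-- stated objective: alternative
-- what changed: The stable descending sort of (priority, sentence) pairs followed by a list-building greedy loop is replaced by distributing sentences into 9 priority buckets in one pass, stacking the buckets highest-priority-first (which reproduces the stable sort order without sorting), counting how many sentences fit the budget, and returning a slice ordered[:k] joined, with the notice chosen by k < len(sentences).
import Mathlib
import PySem

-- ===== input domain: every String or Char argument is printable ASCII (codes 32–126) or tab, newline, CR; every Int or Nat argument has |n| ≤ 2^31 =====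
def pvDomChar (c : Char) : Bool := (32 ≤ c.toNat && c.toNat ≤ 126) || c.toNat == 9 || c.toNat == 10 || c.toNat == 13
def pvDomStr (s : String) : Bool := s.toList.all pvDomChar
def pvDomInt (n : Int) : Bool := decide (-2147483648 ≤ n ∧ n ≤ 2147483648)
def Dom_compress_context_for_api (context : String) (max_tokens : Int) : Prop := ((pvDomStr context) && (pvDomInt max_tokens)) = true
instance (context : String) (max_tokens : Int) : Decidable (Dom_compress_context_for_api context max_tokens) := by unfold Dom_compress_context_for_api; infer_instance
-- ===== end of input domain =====

-- B replaces A's stable descending sort + list-building greedy loop by a one-pass distribution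
-- into 9 priority buckets stacked highest-first, a budget count k, and a take/join; an
-- alternative of similar cost, equivalence of the RETURN value proved on Pre_ (A raises
-- ZeroDivisionError outside it).


-- ===== PORT A =====
def pvKeyTermsA : List String :=
  ["4-cells", "noisy", "vertical", "ECAL", "HCAL", "restart", "ProblemDB", "board"]

-- A's inner loop: priority += 1 for each key term contained (case-insensitively)
def pvPriorityA (sentence : String) : Int :=
  pvKeyTermsA.foldl
    (fun priority term =>
      if PySem.Str.isIn (PySem.Str.lower term) (PySem.Str.lower sentence)
      then priority + 1 else priority) 0

-- A's greedy loop with break: for (priority, sentence) in prioritized_sentences: …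
def pvTakeA (max_tokens : Int) (l : List (Int × String)) (acc : List String) (cur : Int) :
    List String × Int :=
  match l with
  | [] => (acc, cur)
  | (_, s) :: rest =>
    let sentence_tokens := PySem.Int.floordiv (PySem.Str.len s) 4
    if cur + sentence_tokens ≤ max_tokens then
      pvTakeA max_tokens rest (acc ++ [s]) (cur + sentence_tokens)
    else (acc, cur)

def compress_context_for_api (context : String) (max_tokens : Int) : String :=
  let estimated_tokens := PySem.Int.floordiv (PySem.Str.len context) 4
  if estimated_tokens ≤ max_tokens then context
  else
    -- (A computes compression_ratio = max_tokens / estimated_tokens here, a float it never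
    --  uses; it raises ZeroDivisionError when estimated_tokens = 0 — excluded by Pre_)
    let sentences := (PySem.Str.split? context ". ").getD []   -- sep ". " ≠ "", always some
    let prioritized_sentences := sentences.foldl (fun acc s => acc ++ [(pvPriorityA s, s)]) []
    let sortedP := PySem.List.sorted prioritized_sentences (fun x => x.1) true
    let compressed_sentences := (pvTakeA max_tokens sortedP [] 0).1
    let compressed_context := PySem.Str.join ". " compressed_sentences
    if compressed_sentences.length < sentences.length then
      compressed_context ++ "\n\n[Context compressed from "
        ++ PySem.Int.toStr (sentences.length : Int) ++ " to "
        ++ PySem.Int.toStr (compressed_sentences.length : Int)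
        ++ " sentences to fit API limits]"
    else compressed_context

-- ===== PORT B =====
def pvKeyTermsB : List String :=
  ["4-cells", "noisy", "vertical", "ECAL", "HCAL", "restart", "ProblemDB", "board"]

-- B: sum(t.lower() in s.lower() for t in key_terms)
def pvPriorityB (sentence : String) : Nat :=
  pvKeyTermsB.countP
    (fun term => PySem.Str.isIn (PySem.Str.lower term) (PySem.Str.lower sentence))

-- B: buckets[priority(s)].append(s) for each sentence, 9 buckets
def pvBuckets (sentences : List String) : List (List String) :=
  sentences.foldl (fun bs s => bs.modify (pvPriorityB s) (fun b => b ++ [s]))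
    [[], [], [], [], [], [], [], [], []]

-- B: count how many leading sentences fit the token budget (k, with total as cur)
def pvCountFit (max_tokens cur : Int) : List String → Nat
  | [] => 0
  | s :: rest =>
    let t := PySem.Int.floordiv (PySem.Str.len s) 4
    if max_tokens < cur + t then 0
    else pvCountFit max_tokens (cur + t) rest + 1

def compress_context_for_api_alt (context : String) (max_tokens : Int) : String :=
  if max_tokens < PySem.Int.floordiv (PySem.Str.len context) 4 then
    let sentences := (PySem.Str.split? context ". ").getD []
    -- ordered = bucket + ordered, for bucket in buckets (highest priority ends up first)
    let ordered := (pvBuckets sentences).foldl (fun acc bucket => bucket ++ acc) []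
    let k := pvCountFit max_tokens 0 ordered
    let notice :=
      if k < sentences.length then
        "\n\n[Context compressed from " ++ PySem.Int.toStr (sentences.length : Int)
          ++ " to " ++ PySem.Int.toStr (k : Int) ++ " sentences to fit API limits]"
      else ""
    PySem.Str.join ". " (ordered.take k) ++ notice
  else context

-- ===== PRECONDITION & SPEC =====
-- Pre_ excludes exactly the inputs where A raises ZeroDivisionError: context shorter than 4
-- characters (estimated_tokens = 0) together with a negative max_tokens.
def Pre_compress_context_for_api (context : String) (max_tokens : Int) : Prop :=
  ¬ (PySem.Str.len context < 4 ∧ max_tokens < 0)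
instance (context : String) (max_tokens : Int) : Decidable (Pre_compress_context_for_api context max_tokens) := by unfold Pre_compress_context_for_api; infer_instance

def pvWitness_compress_context_for_api : String × Int := ("noisy board. ECAL", 1)

def Spec_compress_context_for_api (context : String) (max_tokens : Int) (out : String) : Prop := out = compress_context_for_api_alt context max_tokens
instance (context : String) (max_tokens : Int) (out : String) : Decidable (Spec_compress_context_for_api context max_tokens out) := by unfold Spec_compress_context_for_api; infer_instance

-- ===== CLAIM (what is proved, stated in full; the proofs are below) =====
def Claim_equal_compress_context_for_api : Prop := ∀ (context : String) (max_tokens : Int), Dom_compress_context_for_api context max_tokens → Pre_compress_context_for_api context max_tokens → Spec_compress_context_for_api context max_tokens (compress_context_for_api context max_tokens)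

-- ===== LEMMAS AND PROOFS =====

-- inserting past a prefix none of whose elements trigger `before`
theorem pv_insertBy_append (before : Int × String → Int × String → Bool) (x : Int × String)
    (ys zs : List (Int × String)) (h : ∀ y ∈ ys, before x y = false) :
    PySem.List.insertBy before x (ys ++ zs) = ys ++ PySem.List.insertBy before x zs := by
  induction ys with
  | nil => simp
  | cons y ys ih =>
    simp only [List.cons_append, PySem.List.insertBy, h y (by simp)]
    simp only [Bool.false_eq_true, if_false, List.cons.injEq, true_and]
    exact ih (fun y hy => h y (by simp [hy]))

theorem pv_insertBy_all (before : Int × String → Int × String → Bool) (x : Int × String)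
    (zs : List (Int × String)) (h : ∀ z ∈ zs, before x z = true) :
    PySem.List.insertBy before x zs = x :: zs := by
  cases zs with
  | nil => rfl
  | cons z zs => simp [PySem.List.insertBy, h z (by simp)]

-- stable descending sort by the Int key = concatenation of the key-value buckets,
-- taken in the (strictly descending) order of `ks`, original order inside each bucket
theorem pv_sorted_rev_buckets (ks : List Int) (hks : ks.Pairwise (· > ·)) :
    ∀ (xs : List (Int × String)), (∀ p ∈ xs, p.1 ∈ ks) →
    PySem.List.sorted xs (fun x => x.1) true
      = ks.flatMap (fun k => xs.filter (fun p => p.1 == k)) := by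
  intro xs
  induction xs using List.reverseRecOn with
  | nil =>
    intro _
    rw [PySem.List.sorted_rev_eq_foldl_insertBy]
    simp
  | append_singleton ys x ih =>
    intro hcov
    rw [PySem.List.sorted_rev_eq_foldl_insertBy, List.foldl_append, List.foldl_cons,
        List.foldl_nil, ← PySem.List.sorted_rev_eq_foldl_insertBy,
        ih (fun p hp => hcov p (by simp [hp]))]
    obtain ⟨ks1, ks2, rfl⟩ := List.append_of_mem (hcov x (by simp))
    obtain ⟨h1, h2, h12⟩ := List.pairwise_append.mp hks
    have hks1 : ∀ k ∈ ks1, x.1 < k := fun k hk => h12 k hk x.1 (by simp)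
    have hks2 : ∀ k ∈ ks2, k < x.1 := fun k hk => (List.pairwise_cons.mp h2).1 k hk
    have hfilter_eq : ∀ k : Int, k ≠ x.1 →
        (ys ++ [x]).filter (fun p => p.1 == k) = ys.filter (fun p => p.1 == k) := by
      intro k hk
      rw [List.filter_append]
      simp [List.filter, show (x.1 == k) = false by simp [Ne.symm hk]]
    have hA1 : ks1.flatMap (fun k => (ys ++ [x]).filter (fun p => p.1 == k))
        = ks1.flatMap (fun k => ys.filter (fun p => p.1 == k)) :=
      List.flatMap_congr (fun k hk => hfilter_eq k (by have := hks1 k hk; omega))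
    have hA2 : ks2.flatMap (fun k => (ys ++ [x]).filter (fun p => p.1 == k))
        = ks2.flatMap (fun k => ys.filter (fun p => p.1 == k)) :=
      List.flatMap_congr (fun k hk => hfilter_eq k (by have := hks2 k hk; omega))
    simp only [List.flatMap_append, List.flatMap_cons, hA1, hA2]
    rw [show (ys ++ [x]).filter (fun p => p.1 == x.1)
          = ys.filter (fun p => p.1 == x.1) ++ [x] by
        rw [List.filter_append]; simp [List.filter]]
    rw [← List.append_assoc,
        pv_insertBy_append _ x
          (ks1.flatMap (fun k => ys.filter (fun p => p.1 == k))
            ++ ys.filter (fun p => p.1 == x.1)) _ ?hpre,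
        pv_insertBy_all _ x _ ?hpost]
    · simp
    case hpre =>
      intro y hy
      rcases List.mem_append.mp hy with hy | hy
      · obtain ⟨k, hk, hyk⟩ := List.mem_flatMap.mp hy
        have : y.1 = k := by simpa using (List.mem_filter.mp hyk).2
        simp only [decide_eq_false_iff_not]
        have := hks1 k hk; omega
      · have : y.1 = x.1 := by simpa using (List.mem_filter.mp hy).2
        simp only [decide_eq_false_iff_not]; omega
    case hpost =>
      intro z hz
      obtain ⟨k, hk, hzk⟩ := List.mem_flatMap.mp hz
      have : z.1 = k := by simpa using (List.mem_filter.mp hzk).2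
      simp only [decide_eq_true_eq]
      have := hks2 k hk; omega

theorem pv_priority_eq (s : String) : pvPriorityA s = ((pvPriorityB s : Nat) : Int) := by
  unfold pvPriorityA pvPriorityB pvKeyTermsA pvKeyTermsB
  rw [PySem.List.foldl_count_if]
  simp

theorem pv_priorityB_le (s : String) : pvPriorityB s ≤ 8 := by
  unfold pvPriorityB
  have := List.countP_le_length
    (l := pvKeyTermsB)
    (p := fun term => PySem.Str.isIn (PySem.Str.lower term) (PySem.Str.lower s))
  have hlen : pvKeyTermsB.length = 8 := by decide
  omega

-- buckets after the distribution pass: bucket i holds the priority-i sentences in order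
theorem pv_buckets_get? (xs : List String) :
    ∀ (bs : List (List String)) (i : Nat),
      (xs.foldl (fun bs s => bs.modify (pvPriorityB s) (fun b => b ++ [s])) bs)[i]?
        = bs[i]?.map (fun b => b ++ xs.filter (fun s => pvPriorityB s == i)) := by
  induction xs with
  | nil => intro bs i; simp
  | cons s xs ih =>
    intro bs i
    simp only [List.foldl_cons, ih]
    by_cases h : pvPriorityB s = i
    · subst h
      rw [List.getElem?_modify_eq]
      cases bs[pvPriorityB s]? <;> simp
    · rw [List.getElem?_modify_ne (h := h)]
      have hp : (pvPriorityB s == i) = false := by simp [h]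
      cases bs[i]? <;> simp [hp]

-- one priority level of the sorted pair list projected to sentences
theorem pv_level (xs : List String) (jn : Nat) (ji : Int) (hj : ji = (jn : Int)) :
    ((xs.map (fun s => (pvPriorityA s, s))).filter (fun p => p.1 == ji)).map Prod.snd
      = xs.filter (fun s => pvPriorityB s == jn) := by
  subst hj
  rw [List.filter_map, List.map_map]
  have : (Prod.snd ∘ fun s => (pvPriorityA s, s)) = (id : String → String) := rfl
  rw [this, List.map_id]
  apply List.filter_congr
  intro s _
  simp [Function.comp, pv_priority_eq, Nat.cast_inj]

theorem pv_takeA_fst (m : Int) : ∀ (l : List (Int × String)) (acc : List String) (cur : Int),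
    (pvTakeA m l acc cur).1
      = acc ++ (l.map Prod.snd).take (pvCountFit m cur (l.map Prod.snd)) := by
  intro l
  induction l with
  | nil => intro acc cur; simp [pvTakeA, pvCountFit]
  | cons p rest ih =>
    intro acc cur
    obtain ⟨q, s⟩ := p
    simp only [List.map_cons, pvTakeA, pvCountFit]
    by_cases h : cur + PySem.Int.floordiv (PySem.Str.len s) 4 ≤ m
    · rw [if_pos h, if_neg (by omega), ih]
      simp
    · rw [if_neg h, if_pos (by omega)]
      simp

-- ===== VERDICT (by name: the statement is the Claim_ definition above) =====
theorem compress_context_for_api_spec : Claim_equal_compress_context_for_api := by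
  intro context max_tokens _ _
  unfold Spec_compress_context_for_api compress_context_for_api compress_context_for_api_alt
  by_cases hbig : PySem.Int.floordiv (PySem.Str.len context) 4 ≤ max_tokens
  · rw [if_pos hbig,
        if_neg (show ¬ max_tokens < PySem.Int.floordiv (PySem.Str.len context) 4 by omega)]
  · rw [if_neg hbig,
        if_pos (show max_tokens < PySem.Int.floordiv (PySem.Str.len context) 4 by omega)]
    set S := (PySem.Str.split? context ". ").getD [] with hS
    have hpr : S.foldl (fun acc s => acc ++ [(pvPriorityA s, s)]) []
        = S.map (fun s => (pvPriorityA s, s)) := by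
      rw [PySem.List.foldl_append_singleton_eq_map, List.nil_append]
    have hcov : ∀ p ∈ S.map (fun s => (pvPriorityA s, s)),
        p.1 ∈ ([8, 7, 6, 5, 4, 3, 2, 1, 0] : List Int) := by
      intro p hp
      obtain ⟨s, _, rfl⟩ := List.mem_map.mp hp
      have h1 := pv_priorityB_le s
      have h2 := pv_priority_eq s
      simp only [List.mem_cons]
      omega
    have hsorted := pv_sorted_rev_buckets [8, 7, 6, 5, 4, 3, 2, 1, 0] (by decide)
      (S.map (fun s => (pvPriorityA s, s))) hcov
    have hb : pvBuckets S
        = [S.filter (fun s => pvPriorityB s == 0),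
           S.filter (fun s => pvPriorityB s == 1),
           S.filter (fun s => pvPriorityB s == 2),
           S.filter (fun s => pvPriorityB s == 3),
           S.filter (fun s => pvPriorityB s == 4),
           S.filter (fun s => pvPriorityB s == 5),
           S.filter (fun s => pvPriorityB s == 6),
           S.filter (fun s => pvPriorityB s == 7),
           S.filter (fun s => pvPriorityB s == 8)] := by
      apply List.ext_getElem?
      intro i
      unfold pvBuckets
      rw [pv_buckets_get? S _ i]
      match i with
      | 0 | 1 | 2 | 3 | 4 | 5 | 6 | 7 | 8 => simp
      | n + 9 => simp
    have hord : (pvBuckets S).foldl (fun acc bucket => bucket ++ acc) []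
        = (PySem.List.sorted (S.map (fun s => (pvPriorityA s, s))) (fun x => x.1) true).map
            Prod.snd := by
      rw [hb, hsorted, List.map_flatMap]
      simp only [List.foldl_cons, List.foldl_nil, List.flatMap_cons, List.flatMap_nil]
      rw [pv_level S 8 8 (by norm_num), pv_level S 7 7 (by norm_num),
          pv_level S 6 6 (by norm_num), pv_level S 5 5 (by norm_num),
          pv_level S 4 4 (by norm_num), pv_level S 3 3 (by norm_num),
          pv_level S 2 2 (by norm_num), pv_level S 1 1 (by norm_num),
          pv_level S 0 0 (by norm_num)]
    simp only [hpr, hord, pv_takeA_fst, List.nil_append]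
    set ordered :=
      (PySem.List.sorted (S.map (fun s => (pvPriorityA s, s))) (fun x => x.1) true).map
        Prod.snd with hordd
    set k := pvCountFit max_tokens 0 ordered with hk
    have hlen : ordered.length = S.length := by
      rw [hordd, List.length_map,
          (PySem.List.sorted_perm (S.map (fun s => (pvPriorityA s, s)))
            (fun x => x.1) true).length_eq,
          List.length_map]
    have htl : (ordered.take k).length = min k S.length := by
      rw [List.length_take, hlen]
    by_cases hcond : k < S.length
    · rw [if_pos (show (ordered.take k).length < S.length by omega), if_pos hcond,
          show (ordered.take k).length = k by omega]
      simp [String.append_assoc]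
    · rw [if_neg (show ¬ (ordered.take k).length < S.length by omega), if_neg hcond]
      simp
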